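-- pv_equiv track=rewrite | github.com/Kevino135/skripsi | GitSanity/gitSanity.py | getCompressedPath
-- ===== SOURCE A (Python) =====
-- def getCompressedPath(compressed_file):
--     compressed_path = dict()
--
--     for key, vals in compressed_file.items():
--         if vals not in compressed_path.keys():
--             compressed_path[vals] = list()
--
--         split_file_path = key.split("/")
--         get_parent = "/".join(split_file_path[:2])
--
--         if get_parent not in compressed_path[vals]:
--             compressed_path[vals].append(get_parent)
--
--     return compressed_path
-- ===== SOURCE B (Python) =====
-- def getCompressedPath(compressed_file):
--     items = list(compressed_file.items())
--     result = {}
--     for _, vals in items: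
--         if vals not in result:
--             parents = []
--             for key, kv in items:
--                 if kv == vals:
--                     parent = "/".join(key.split("/")[:2])
--                     if parent not in parents:
--                         parents.append(parent)
--             result[vals] = parents
--     return result
-- ===== Notes on version B (the rewrite author's own statement) =====
-- stated objective: alternative
-- what changed: Instead of A's single incremental pass that maintains and extends per-value lists in a dict, B iterates over the items and, the first time each value is seen, performs a full nested rescan of all items to collect that value's deduplicated parent list in one go (a group-by via repeated filtering rather than incremental dict updates).
import Mathlib
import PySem

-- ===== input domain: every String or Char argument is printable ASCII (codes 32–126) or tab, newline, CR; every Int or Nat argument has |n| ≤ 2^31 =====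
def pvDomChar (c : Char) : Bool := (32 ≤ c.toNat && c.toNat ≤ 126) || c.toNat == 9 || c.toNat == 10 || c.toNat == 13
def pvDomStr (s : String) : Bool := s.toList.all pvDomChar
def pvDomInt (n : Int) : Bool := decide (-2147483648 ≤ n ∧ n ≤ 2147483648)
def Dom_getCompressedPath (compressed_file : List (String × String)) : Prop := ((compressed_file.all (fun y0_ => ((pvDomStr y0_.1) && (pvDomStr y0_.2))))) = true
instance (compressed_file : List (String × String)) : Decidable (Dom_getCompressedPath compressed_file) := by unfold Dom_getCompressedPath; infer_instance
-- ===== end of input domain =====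

-- B replaces A's single incremental pass (a dict of growing per-value lists) by a
-- group-by through repeated filtering: at each value's first occurrence it rescans
-- the whole item list to build that value's deduplicated parent list in one go.
-- Same results; B is not claimed faster.

-- shared helper: "/".join(key.split("/")[:2]) — both Pythons compute the parent this way
-- ("/" is a non-empty separator, so split? always returns some; getD [] is unreachable)
def pvParent (key : String) : String :=
  PySem.Str.join "/" (PySem.List.slice ((PySem.Str.split? key "/").getD []) none (some 2))

-- ===== PORT A =====
-- the body of A's loop, one item at a time
def pvAStep (compressed_path : PySem.Dict String (List String)) (kv : String × String) :
    PySem.Dict String (List String) :=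
  let compressed_path :=
    if compressed_path.contains kv.2 then compressed_path
    else compressed_path.insert kv.2 ([] : List String)
  let get_parent := pvParent kv.1
  if get_parent ∈ compressed_path.getD kv.2 [] then compressed_path
  else compressed_path.insert kv.2 (compressed_path.getD kv.2 [] ++ [get_parent])

def getCompressedPath (compressed_file : List (String × String)) : List (String × List String) :=
  (compressed_file.foldl pvAStep (PySem.Dict.empty : PySem.Dict String (List String))).items

-- ===== PORT B =====
-- B's inner loop: the deduplicated parents of all items carrying the value `vals`
def pvParentsFor (items : List (String × String)) (vals : String) : List String :=
  items.foldl (fun parents p =>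
    if p.2 == vals then
      let parent := pvParent p.1
      if parent ∈ parents then parents else parents ++ [parent]
    else parents) []

-- B's outer loop body: on a value's first occurrence, rescan all items for its parents
def pvBStep (items : List (String × String)) (result : PySem.Dict String (List String))
    (p : String × String) : PySem.Dict String (List String) :=
  if result.contains p.2 then result else result.insert p.2 (pvParentsFor items p.2)

def getCompressedPath_alt (compressed_file : List (String × String)) : List (String × List String) :=
  (compressed_file.foldl (pvBStep compressed_file)
    (PySem.Dict.empty : PySem.Dict String (List String))).items

-- ===== PRECONDITION & SPEC =====
def Spec_getCompressedPath (compressed_file : List (String × String)) (out : List (String × List String)) : Prop := out = getCompressedPath_alt compressed_file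
instance (compressed_file : List (String × String)) (out : List (String × List String)) : Decidable (Spec_getCompressedPath compressed_file out) := by unfold Spec_getCompressedPath; infer_instance

-- ===== CLAIM =====
def Claim_equal_getCompressedPath : Prop := ∀ (compressed_file : List (String × String)), Dom_getCompressedPath compressed_file → Spec_getCompressedPath compressed_file (getCompressedPath compressed_file)

-- ===== LEMMAS AND PROOFS =====

-- the common normal form of both results: a dict keyed by the distinct values in
-- first-seen order, each mapped through a value-to-list function
def fdict (vs : List String) (f : String → List String) : PySem.Dict String (List String) :=
  PySem.Dict.mk (vs.map (fun v => (v, f v)))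

def pvVals (l : List (String × String)) : List String :=
  PySem.Set.ofList (l.map Prod.snd)

theorem fdict_congr (vs : List String) (f g : String → List String)
    (h : ∀ v ∈ vs, f v = g v) : fdict vs f = fdict vs g := by
  apply PySem.Dict.ext
  exact List.map_congr_left (fun v hv => by rw [h v hv])

theorem fdict_keys (vs : List String) (f : String → List String) :
    (fdict vs f).keys = vs := by
  simp [fdict, PySem.Dict.keys, Function.comp_def]

theorem fdict_contains (vs : List String) (f : String → List String) (v : String) :
    (fdict vs f).contains v = decide (v ∈ vs) := by
  rw [PySem.Dict.contains_eq_decide_mem_keys, fdict_keys]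

theorem fdict_getD (vs : List String) (f : String → List String) (v : String)
    (h : v ∈ vs) : (fdict vs f).getD v [] = f v := by
  induction vs with
  | nil => cases h
  | cons w rest ih =>
    rw [show fdict (w :: rest) f
        = PySem.Dict.mk ((w, f w) :: rest.map (fun v => (v, f v))) from rfl,
      PySem.Dict.getD_eq_get?_getD, PySem.Dict.get?_mk_cons]
    by_cases hw : w = v
    · simp [hw]
    · have hv : v ∈ rest := by
        cases h with
        | head => exact absurd rfl hw
        | tail _ h' => exact h'
      have := ih hv
      rw [PySem.Dict.getD_eq_get?_getD] at this
      simpa [hw] using this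

theorem fdict_insert_mem (vs : List String) (f : String → List String) (v : String)
    (L : List String) (h : v ∈ vs) :
    (fdict vs f).insert v L = fdict vs (fun w => if w = v then L else f w) := by
  apply PySem.Dict.ext
  rw [PySem.Dict.items_insert_of_contains _ L
      (by rw [fdict_contains]; exact decide_eq_true h)]
  show (vs.map (fun w => (w, f w))).map _ = vs.map _
  rw [List.map_map]
  apply List.map_congr_left
  intro w _
  by_cases hw : w = v <;> simp [hw]

theorem fdict_insert_not_mem (vs : List String) (f : String → List String) (v : String)
    (L : List String) (h : v ∉ vs) :
    (fdict vs f).insert v L = fdict (vs ++ [v]) (fun w => if w = v then L else f w) := by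
  apply PySem.Dict.ext
  rw [PySem.Dict.items_insert_of_not_contains _ L
      (by rw [fdict_contains]; exact decide_eq_false h)]
  show vs.map (fun w => (w, f w)) ++ [(v, L)] = (vs ++ [v]).map _
  rw [List.map_append]
  congr 1
  · apply List.map_congr_left
    intro w hw
    have : w ≠ v := fun e => h (e ▸ hw)
    simp [this]
  · simp

-- pvParentsFor over an appended singleton is its loop body applied once
theorem pvParentsFor_append (l : List (String × String)) (x : String × String) (w : String) :
    pvParentsFor (l ++ [x]) w =
      if x.2 == w then
        (if pvParent x.1 ∈ pvParentsFor l w then pvParentsFor l w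
         else pvParentsFor l w ++ [pvParent x.1])
      else pvParentsFor l w := by
  simp [pvParentsFor, List.foldl_append]

theorem pvParentsFor_nil_of_not_mem (l : List (String × String)) (w : String)
    (h : w ∉ l.map Prod.snd) : pvParentsFor l w = [] := by
  induction l using List.reverseRecOn with
  | nil => rfl
  | append_singleton l x ih =>
    rw [List.map_append, List.mem_append] at h
    push Not at h
    rw [pvParentsFor_append]
    have hx : (x.2 == w) = false :=
      beq_eq_false_iff_ne.mpr (fun e => h.2 (by simp [e]))
    rw [hx]
    simp only [Bool.false_eq_true, if_false]
    exact ih h.1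

theorem pvVals_append (l : List (String × String)) (x : String × String) :
    pvVals (l ++ [x]) = PySem.Set.add (pvVals l) x.2 := by
  simp [pvVals, List.map_append, PySem.Set.ofList_append_singleton]

-- A's fold reaches the normal form
theorem A_normal (l : List (String × String)) :
    l.foldl pvAStep (PySem.Dict.empty : PySem.Dict String (List String))
      = fdict (pvVals l) (pvParentsFor l) := by
  induction l using List.reverseRecOn with
  | nil => rfl
  | append_singleton l x ih =>
    rw [List.foldl_append, List.foldl_cons, List.foldl_nil, ih]
    unfold pvAStep
    by_cases hmem : x.2 ∈ pvVals l
    · have hc : (fdict (pvVals l) (pvParentsFor l)).contains x.2 = true := by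
        rw [fdict_contains]; exact decide_eq_true hmem
      have hg : (fdict (pvVals l) (pvParentsFor l)).getD x.2 [] = pvParentsFor l x.2 :=
        fdict_getD _ _ _ hmem
      rw [pvVals_append, PySem.Set.add_of_mem hmem]
      simp only [hc, if_true, hg]
      by_cases hp : pvParent x.1 ∈ pvParentsFor l x.2
      · simp only [hp, if_true]
        apply fdict_congr
        intro w hw
        rw [pvParentsFor_append]
        by_cases hwx : x.2 = w
        · subst hwx; simp [hp]
        · simp [hwx]
      · simp only [hp, if_false]
        rw [fdict_insert_mem _ _ _ _ hmem]
        apply fdict_congr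
        intro w hw
        rw [pvParentsFor_append]
        by_cases hwx : w = x.2
        · subst hwx; simp [hp]
        · have : (x.2 == w) = false := beq_eq_false_iff_ne.mpr (fun e => hwx e.symm)
          simp [this, hwx]
    · have hc : (fdict (pvVals l) (pvParentsFor l)).contains x.2 = false := by
        rw [fdict_contains]; exact decide_eq_false hmem
      simp only [hc, Bool.false_eq_true, if_false, PySem.Dict.getD_insert_self,
        List.not_mem_nil, List.nil_append]
      rw [PySem.Dict.insert_insert_self,
        fdict_insert_not_mem _ _ _ _ hmem,
        pvVals_append, PySem.Set.add_of_not_mem hmem]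
      apply fdict_congr
      intro w hw
      have hnotl : x.2 ∉ l.map Prod.snd := fun h => hmem (by
        rw [pvVals, PySem.Set.mem_ofList]; exact h)
      rw [pvParentsFor_append]
      by_cases hwx : w = x.2
      · subst hwx
        rw [pvParentsFor_nil_of_not_mem l x.2 hnotl]
        simp
      · have : (x.2 == w) = false := beq_eq_false_iff_ne.mpr (fun e => hwx e.symm)
        simp [this, hwx]

-- B's outer fold invariant: it extends the key set by the unseen values,
-- always mapping each value through pvParentsFor of the full list
theorem B_inv (l : List (String × String)) (l' : List (String × String)) (vs : List String) :
    l'.foldl (pvBStep l) (fdict vs (pvParentsFor l))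
      = fdict (PySem.Set.update vs (l'.map Prod.snd)) (pvParentsFor l) := by
  induction l' generalizing vs with
  | nil => rw [List.foldl_nil, List.map_nil, PySem.Set.update_nil]
  | cons p rest ih =>
    rw [List.foldl_cons, List.map_cons, PySem.Set.update_cons]
    unfold pvBStep
    by_cases hmem : p.2 ∈ vs
    · rw [fdict_contains, decide_eq_true hmem, if_pos rfl,
        PySem.Set.add_of_mem hmem]
      exact ih vs
    · rw [fdict_contains, decide_eq_false hmem]
      simp only [Bool.false_eq_true, if_false]
      have hcg := fdict_congr (vs ++ [p.2])
        (fun w => if w = p.2 then pvParentsFor l p.2 else pvParentsFor l w)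
        (pvParentsFor l) (fun w _ => by by_cases hw : w = p.2 <;> simp [hw])
      rw [fdict_insert_not_mem _ _ _ _ hmem, hcg, PySem.Set.add_of_not_mem hmem]
      exact ih (vs ++ [p.2])

-- ===== VERDICT =====
theorem getCompressedPath_spec : Claim_equal_getCompressedPath := by
  intro compressed_file _
  unfold Spec_getCompressedPath getCompressedPath getCompressedPath_alt
  rw [A_normal]
  have h0 : (PySem.Dict.empty : PySem.Dict String (List String))
      = fdict [] (pvParentsFor compressed_file) := by apply PySem.Dict.ext; rfl
  rw [h0, B_inv compressed_file compressed_file []]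
  rw [PySem.Set.update_nil_left]
  rfl
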